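-- pv_equiv track=rewrite | github.com/jvargas2/team0-project | features/polarity.py | get_overall_polarity
-- ===== SOURCE A (Python) =====
-- POSITIVE_ACIDS = ["R", "K", "H"]
--
-- NEGATIVE_ACIDS = ["D", "E"]
--
-- def get_overall_polarity(sequence):
--     overall_polarity = 0
--     for acid in sequence:
--         if acid in POSITIVE_ACIDS:
--             overall_polarity += 1
--         elif acid in NEGATIVE_ACIDS:
--             overall_polarity -= 1
--     return overall_polarity
-- ===== SOURCE B (Python) =====
-- POSITIVE_ACIDS = ["R", "K", "H"]
--
-- NEGATIVE_ACIDS = ["D", "E"]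
--
-- def get_overall_polarity(sequence):
--     counts = {}
--     for acid in sequence:
--         counts[acid] = counts.get(acid, 0) + 1
--     return (sum(counts.get(a, 0) for a in POSITIVE_ACIDS)
--             - sum(counts.get(a, 0) for a in NEGATIVE_ACIDS))
-- ===== Notes on version B (the rewrite author's own statement) =====
-- stated objective: alternative
-- what changed: Replaces the per-character branch-and-accumulate loop with tabulate-then-aggregate: one pass builds a frequency dict of the sequence, then the result is the sum of the positive-acid counts minus the sum of the negative-acid counts.
import Mathlib
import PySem

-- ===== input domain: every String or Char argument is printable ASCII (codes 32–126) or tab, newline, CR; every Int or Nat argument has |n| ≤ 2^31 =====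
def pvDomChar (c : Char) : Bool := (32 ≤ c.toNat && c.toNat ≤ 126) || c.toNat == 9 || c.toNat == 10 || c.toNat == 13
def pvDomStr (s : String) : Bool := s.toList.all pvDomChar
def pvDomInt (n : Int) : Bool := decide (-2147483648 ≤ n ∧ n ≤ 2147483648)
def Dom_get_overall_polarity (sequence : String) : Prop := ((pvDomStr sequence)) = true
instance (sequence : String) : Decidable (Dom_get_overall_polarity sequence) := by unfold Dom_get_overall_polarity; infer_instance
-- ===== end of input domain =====

-- ===== PORT A =====
-- B replaces the per-character branch-and-accumulate with a frequency table built in one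
-- pass, then aggregates the counts of the fixed positive/negative acid keys.
def get_overall_polarity (sequence : String) : Int :=
  sequence.toList.foldl
    (fun overall_polarity acid =>
      if acid ∈ ['R', 'K', 'H'] then overall_polarity + 1
      else if acid ∈ ['D', 'E'] then overall_polarity - 1
      else overall_polarity) 0

-- ===== PORT B =====
def get_overall_polarity_alt (sequence : String) : Int :=
  let counts : PySem.Dict Char Int :=
    sequence.toList.foldl (fun d acid => d.insert acid (d.getD acid 0 + 1)) PySem.Dict.empty
  (['R', 'K', 'H'].map (fun a => counts.getD a 0)).sum
    - (['D', 'E'].map (fun a => counts.getD a 0)).sum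

-- ===== PRECONDITION & SPEC =====
def Spec_get_overall_polarity (sequence : String) (out : Int) : Prop := out = get_overall_polarity_alt sequence
instance (sequence : String) (out : Int) : Decidable (Spec_get_overall_polarity sequence out) := by unfold Spec_get_overall_polarity; infer_instance

-- ===== CLAIM (what is proved, stated in full; the proofs are below) =====
def Claim_equal_get_overall_polarity : Prop := ∀ (sequence : String), Dom_get_overall_polarity sequence → Spec_get_overall_polarity sequence (get_overall_polarity sequence)

-- ===== LEMMAS AND PROOFS =====

lemma polarity_foldl (l : List Char) (acc : Int) :
    l.foldl
      (fun overall_polarity acid =>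
        if acid ∈ ['R', 'K', 'H'] then overall_polarity + 1
        else if acid ∈ ['D', 'E'] then overall_polarity - 1
        else overall_polarity) acc
    = acc + ((l.count 'R' : Int) + l.count 'K' + l.count 'H')
        - ((l.count 'D' : Int) + l.count 'E') := by
  induction l generalizing acc with
  | nil => simp
  | cons c t ih =>
    simp only [List.foldl_cons]
    by_cases h1 : c ∈ ['R', 'K', 'H']
    · rw [if_pos h1, ih]
      simp only [List.mem_cons, List.not_mem_nil, or_false] at h1
      rcases h1 with h | h | h <;> subst h <;>
        simp <;> ring
    · rw [if_neg h1]
      by_cases h2 : c ∈ ['D', 'E']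
      · rw [if_pos h2, ih]
        simp only [List.mem_cons, List.not_mem_nil, or_false] at h2
        rcases h2 with h | h <;> subst h <;>
          simp <;> ring
      · rw [ih]
        simp only [List.mem_cons, List.not_mem_nil, or_false, not_or] at h1 h2
        simp [h1.1, h1.2.1, h1.2.2, h2.1, h2.2]

-- ===== VERDICT (by name: the statement is the Claim_ definition above) =====
theorem get_overall_polarity_spec : Claim_equal_get_overall_polarity := by
  intro sequence _
  unfold Spec_get_overall_polarity get_overall_polarity get_overall_polarity_alt
  simp only [polarity_foldl, PySem.Dict.getD_foldl_insert_add_one, List.map, List.sum_cons,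
    List.sum_nil]
  simp [PySem.Dict.empty, PySem.Dict.getD, PySem.Dict.get?]
  ring
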